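-- pv_equiv track=rewrite | github.com/Lv-750-02-PythonFundamentals/hw_Lv_750 | hw06/VadimMarkov1/hw06_01.py | determine_numbers
-- ===== SOURCE A (Python) =====
-- def determine_numbers(n):
--     even_numbers = []
--     odd_numbers_div_3 = []
--     numbers_not_div_2_3 = []
--     for i in range(1, n+1):
--         if i % 2 == 0:
--             even_numbers.append(i)
--         elif i % 2 != 0 and i % 3 == 0:
--             odd_numbers_div_3.append(i)
--         else:
--             numbers_not_div_2_3.append(i)
--     return f"From numbers in the range from 1 to {n}:\n" \
--            f"even numbers that are divisible by 2 - {' '.join(map(str, even_numbers))}\n" \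
--            f"odd numbers, which are divisible by 3 - {' '.join(map(str, odd_numbers_div_3))}\n" \
--            f"numbers that are not divisible by 2 and 3 - {' '.join(map(str, numbers_not_div_2_3))}"
-- ===== SOURCE B (Python) =====
-- def determine_numbers(n):
--     even_numbers = list(range(2, n + 1, 2))
--     odd_numbers_div_3 = list(range(3, n + 1, 6))
--     numbers_not_div_2_3 = [i for i in range(1, n + 1) if i % 2 != 0 and i % 3 != 0]
--     return f"From numbers in the range from 1 to {n}:\n" \
--            f"even numbers that are divisible by 2 - {' '.join(map(str, even_numbers))}\n" \
--            f"odd numbers, which are divisible by 3 - {' '.join(map(str, odd_numbers_div_3))}\n" \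
--            f"numbers that are not divisible by 2 and 3 - {' '.join(map(str, numbers_not_div_2_3))}"
-- ===== Notes on version B (the rewrite author's own statement) =====
-- stated objective: idiomatic
-- what changed: Replaces the single classification loop with if/elif/else by direct construction of the first two groups as arithmetic progressions (range(2,n+1,2) and range(3,n+1,6), since odd multiples of 3 are exactly the numbers congruent to 3 mod 6) plus one comprehension for the remainder.
import Mathlib
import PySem

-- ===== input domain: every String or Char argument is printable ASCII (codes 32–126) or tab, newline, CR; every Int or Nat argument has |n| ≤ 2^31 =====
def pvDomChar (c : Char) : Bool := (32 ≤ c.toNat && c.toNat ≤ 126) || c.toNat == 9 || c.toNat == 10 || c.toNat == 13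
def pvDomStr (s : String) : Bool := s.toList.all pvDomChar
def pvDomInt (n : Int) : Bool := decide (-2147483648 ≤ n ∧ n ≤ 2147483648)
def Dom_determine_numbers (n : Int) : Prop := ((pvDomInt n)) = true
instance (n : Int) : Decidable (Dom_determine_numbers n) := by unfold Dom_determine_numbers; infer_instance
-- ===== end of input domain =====

-- B builds the first two groups directly as arithmetic progressions and filters only the
-- remainder, instead of A's uniform classification loop; objective: more idiomatic.

-- the shared f-string of both Pythons (identical text in Source A and Source B)
def pvFmt (n : Int) (ev od rest : List Int) : String :=
  PySem.Str.join ""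
    [ "From numbers in the range from 1 to ", PySem.Int.toStr n, ":\n",
      "even numbers that are divisible by 2 - ", PySem.Str.join " " (ev.map PySem.Int.toStr), "\n",
      "odd numbers, which are divisible by 3 - ", PySem.Str.join " " (od.map PySem.Int.toStr), "\n",
      "numbers that are not divisible by 2 and 3 - ", PySem.Str.join " " (rest.map PySem.Int.toStr) ]

-- ===== PORT A =====
def determine_numbers (n : Int) : String :=
  let s := (PySem.List.pyRange 1 (n + 1) 1).foldl
    (fun (acc : List Int × List Int × List Int) i =>
      if PySem.Int.mod i 2 = 0 then (acc.1 ++ [i], acc.2.1, acc.2.2)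
      else if PySem.Int.mod i 2 ≠ 0 ∧ PySem.Int.mod i 3 = 0 then (acc.1, acc.2.1 ++ [i], acc.2.2)
      else (acc.1, acc.2.1, acc.2.2 ++ [i]))
    ([], [], [])
  pvFmt n s.1 s.2.1 s.2.2

-- ===== PORT B =====
def determine_numbers_alt (n : Int) : String :=
  let even_numbers := PySem.List.pyRange 2 (n + 1) 2
  let odd_numbers_div_3 := PySem.List.pyRange 3 (n + 1) 6
  let numbers_not_div_2_3 := (PySem.List.pyRange 1 (n + 1) 1).filter
    (fun i => PySem.Int.mod i 2 ≠ 0 ∧ PySem.Int.mod i 3 ≠ 0)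
  pvFmt n even_numbers odd_numbers_div_3 numbers_not_div_2_3

-- ===== PRECONDITION & SPEC =====
def Spec_determine_numbers (n : Int) (out : String) : Prop := out = determine_numbers_alt n
instance (n : Int) (out : String) : Decidable (Spec_determine_numbers n out) := by unfold Spec_determine_numbers; infer_instance

-- ===== CLAIM (what is proved, stated in full; the proofs are below) =====
def Claim_equal_determine_numbers : Prop := ∀ (n : Int), Dom_determine_numbers n → Spec_determine_numbers n (determine_numbers n)

-- ===== LEMMAS AND PROOFS =====

-- A's single loop is three filters of the same list
theorem pvFoldl_eq_filters (p q : Int → Prop) [DecidablePred p] [DecidablePred q]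
    (l : List Int) (a b c : List Int) :
    l.foldl
      (fun (acc : List Int × List Int × List Int) i =>
        if p i then (acc.1 ++ [i], acc.2.1, acc.2.2)
        else if q i then (acc.1, acc.2.1 ++ [i], acc.2.2)
        else (acc.1, acc.2.1, acc.2.2 ++ [i]))
      (a, b, c)
    = (a ++ l.filter (fun i => p i),
       b ++ l.filter (fun i => ¬ p i ∧ q i),
       c ++ l.filter (fun i => ¬ p i ∧ ¬ q i)) := by
  induction l generalizing a b c with
  | nil => simp
  | cons x xs ih =>
    simp only [List.foldl_cons, List.filter_cons]
    by_cases hp : p x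
    · simp [hp, ih]
    · by_cases hq : q x
      · simp [hp, hq, ih]
      · simp [hp, hq, ih]

theorem pvPairwise_pyRange_pos (a b s : Int) (hs : 0 < s) :
    (PySem.List.pyRange a b s).Pairwise (· < ·) := by
  rw [PySem.List.pyRange_of_pos a b hs]
  refine List.Pairwise.map _ ?_ (List.pairwise_lt_range)
  intro x y hxy
  have := Int.ofNat_lt.mpr hxy
  nlinarith

theorem pvNodup_pyRange_pos (a b s : Int) (hs : 0 < s) :
    (PySem.List.pyRange a b s).Nodup := by
  have := pvPairwise_pyRange_pos a b s hs
  exact this.imp (fun h => ne_of_lt h)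

-- strided range = filter of the unit range (proved via sortedness + membership)
theorem pvRange_eq_filter (n : Int) (s : Int) (a : Int) (hs : 0 < s)
    (p : Int → Bool)
    (hmem : ∀ x, (a ≤ x ∧ x < n + 1 ∧ s ∣ x - a) ↔ ((1 ≤ x ∧ x < n + 1) ∧ p x = true)) :
    PySem.List.pyRange a (n + 1) s = (PySem.List.pyRange 1 (n + 1) 1).filter p := by
  have h1 : (PySem.List.pyRange a (n + 1) s).Nodup := pvNodup_pyRange_pos _ _ _ hs
  have h2 : ((PySem.List.pyRange 1 (n + 1) 1).filter p).Nodup :=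
    (PySem.List.nodup_pyRange_one 1 (n + 1)).filter p
  have hperm : (PySem.List.pyRange a (n + 1) s).Perm ((PySem.List.pyRange 1 (n + 1) 1).filter p) := by
    rw [List.perm_ext_iff_of_nodup h1 h2]
    intro x
    rw [PySem.List.mem_pyRange_iff_of_pos hs, List.mem_filter, PySem.List.mem_pyRange_one]
    exact hmem x
  have hpw1 : (PySem.List.pyRange a (n + 1) s).Pairwise (· < ·) := pvPairwise_pyRange_pos _ _ _ hs
  have hpw2 : ((PySem.List.pyRange 1 (n + 1) 1).filter p).Pairwise (· < ·) :=
    List.Pairwise.filter p (PySem.List.pairwise_lt_pyRange_one 1 (n + 1))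
  exact PySem.List.eq_of_perm_of_pairwise_le_of_injective (fun x : Int => x)
    (fun _ _ h => h) hperm (hpw1.imp le_of_lt) (hpw2.imp le_of_lt)

-- ===== VERDICT (by name: the statement is the Claim_ definition above) =====
theorem determine_numbers_spec : Claim_equal_determine_numbers := by
  intro n _
  unfold Spec_determine_numbers determine_numbers determine_numbers_alt
  rw [pvFoldl_eq_filters (fun i => PySem.Int.mod i 2 = 0)
        (fun i => PySem.Int.mod i 2 ≠ 0 ∧ PySem.Int.mod i 3 = 0)]
  simp only [List.nil_append]
  have hev : PySem.List.pyRange 2 (n + 1) 2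
      = (PySem.List.pyRange 1 (n + 1) 1).filter (fun i => PySem.Int.mod i 2 = 0) := by
    refine pvRange_eq_filter n 2 2 (by norm_num) _ ?_
    intro x
    simp only [decide_eq_true_eq, PySem.Int.mod_eq_zero_iff_dvd]
    omega
  have hod : PySem.List.pyRange 3 (n + 1) 6
      = (PySem.List.pyRange 1 (n + 1) 1).filter
          (fun i => ¬ PySem.Int.mod i 2 = 0 ∧ (PySem.Int.mod i 2 ≠ 0 ∧ PySem.Int.mod i 3 = 0)) := by
    refine pvRange_eq_filter n 6 3 (by norm_num) _ ?_
    intro x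
    simp only [decide_eq_true_eq, PySem.Int.mod_eq_zero_iff_dvd, ne_eq]
    omega
  have hrest : ((PySem.List.pyRange 1 (n + 1) 1).filter
        (fun i => ¬ PySem.Int.mod i 2 = 0 ∧ ¬(PySem.Int.mod i 2 ≠ 0 ∧ PySem.Int.mod i 3 = 0)))
      = (PySem.List.pyRange 1 (n + 1) 1).filter
        (fun i => PySem.Int.mod i 2 ≠ 0 ∧ PySem.Int.mod i 3 ≠ 0) := by
    apply List.filter_congr
    intro x _
    simp only [ne_eq, decide_eq_decide]
    tauto
  rw [hev, hod, hrest]
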